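-- pv_equiv track=rewrite | github.com/sbernal93/idss-project | Source/questions_generator.py | check_children
-- ===== SOURCE A (Python) =====
-- def check_children(index, is_leaves, children_right, children_left, values):
--     if is_leaves[index]:
--         if values[index][0][0]>values[index][0][1]:
--             return "no"
--         else:
--             return "yes"
--     else:
--         result_right = check_children(children_right[index], is_leaves, children_right, children_left, values)
--         result_left  = check_children(children_left[index], is_leaves, children_right, children_left, values)
--         if result_right == result_left and result_right != "not-equal":
--             return result_right
--         else:
--             return "not-equal"
-- ===== SOURCE B (Python) =====
-- def check_children(index, is_leaves, children_right, children_left, values):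
--     if is_leaves[index]:
--         return "no" if values[index][0][0] > values[index][0][1] else "yes"
--     n = len(is_leaves)
--     reach = [False] * n
--     reach[index] = True
--     labels = set()
--     for i in range(index, n):
--         if reach[i]:
--             if is_leaves[i]:
--                 labels.add("no" if values[i][0][0] > values[i][0][1] else "yes")
--             else:
--                 reach[children_left[i]] = True
--                 reach[children_right[i]] = True
--     return labels.pop() if len(labels) == 1 else "not-equal"
-- ===== Notes on version B (the rewrite author's own statement) =====
-- stated objective: alternative
-- what changed: Replaces A's recursive combine of left/right results by a single forward sweep over node indices with a reachability bit-array (valid because Pre_ guarantees children indices exceed their parent), collecting leaf labels into a set and reading the answer off the set; no recursion and no stack.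
-- outside the precondition, e.g. on check_children(1, [True, False], [0, 0], [0, 0], [[[1, 2]], [[1, 2]]]): A returns 'yes', B returns 'not-equal'; on check_children(-2, [False, True], [1, 1], [1, 1], [[], [[1, 2]]]): A returns 'yes', B returns 'yes'
import Mathlib
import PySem

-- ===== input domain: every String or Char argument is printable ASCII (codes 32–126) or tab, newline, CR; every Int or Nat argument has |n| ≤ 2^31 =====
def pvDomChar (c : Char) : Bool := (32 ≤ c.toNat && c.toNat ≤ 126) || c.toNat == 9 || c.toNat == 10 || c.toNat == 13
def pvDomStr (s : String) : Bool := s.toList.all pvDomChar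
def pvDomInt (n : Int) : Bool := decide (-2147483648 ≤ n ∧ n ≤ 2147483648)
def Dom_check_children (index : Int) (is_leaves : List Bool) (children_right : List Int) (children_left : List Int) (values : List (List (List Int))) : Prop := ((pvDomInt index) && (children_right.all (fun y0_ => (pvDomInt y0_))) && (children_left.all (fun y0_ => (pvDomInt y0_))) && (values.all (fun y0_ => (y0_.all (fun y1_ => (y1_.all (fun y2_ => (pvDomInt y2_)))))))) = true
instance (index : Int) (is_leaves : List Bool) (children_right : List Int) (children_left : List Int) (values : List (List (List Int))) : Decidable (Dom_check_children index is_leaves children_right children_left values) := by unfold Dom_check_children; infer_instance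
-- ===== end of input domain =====

-- B replaces A's recursion by one forward sweep over the node table with a reachability
-- bit-array plus a set of collected leaf labels (objective: alternative, same cost).

-- ===== PORT A =====
-- Shared leaf expression of both Pythons: '"no" if values[i][0][0] > values[i][0][1] else "yes"'.
-- A 'none' (Python IndexError) yields the dummy "not-equal"; such inputs are outside Pre_.
def pvLeaf (values : List (List (List Int))) (i : Int) : String :=
  match (PySem.List.pyGet? values i).bind (fun row => PySem.List.pyGet? row 0) with
  | none => "not-equal"
  | some v0 =>
    match PySem.List.pyGet? v0 0, PySem.List.pyGet? v0 1 with
    | some a, some b => if a > b then "no" else "yes"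
    | _, _ => "not-equal"

-- A's recursion, with a fuel bound for Lean termination: under Pre_ children indices strictly
-- increase, so recursion depth ≤ is_leaves.length and the fuel is never exhausted.
-- pyGetD's default 0 stands for an index where Python would raise IndexError (outside Pre_).
def pvCheckA (fuel : Nat) (index : Int) (is_leaves : List Bool) (children_right children_left : List Int) (values : List (List (List Int))) : String :=
  match fuel with
  | 0 => "not-equal"
  | f+1 =>
    match PySem.List.pyGet? is_leaves index with
    | none => "not-equal"
    | some b =>
      if b then pvLeaf values index
      else
        let result_right := pvCheckA f (PySem.List.pyGetD children_right index 0) is_leaves children_right children_left values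
        let result_left := pvCheckA f (PySem.List.pyGetD children_left index 0) is_leaves children_right children_left values
        if result_right = result_left ∧ result_right ≠ "not-equal" then result_right else "not-equal"

def check_children (index : Int) (is_leaves : List Bool) (children_right : List Int) (children_left : List Int) (values : List (List (List Int))) : String :=
  pvCheckA (is_leaves.length + 1) index is_leaves children_right children_left values

-- ===== PORT B =====
-- One iteration of B's 'for i in range(index, n)' body, over the state (reach, labels).
-- 'reach[i]' / 'is_leaves[i]' / the assignments 'reach[c] = True' are total pyGetD/pySetD
-- forms; inside Pre_ every such index is in range, exactly as in the Python.
def pvSweepStep (is_leaves : List Bool) (children_right children_left : List Int) (values : List (List (List Int))) (st : List Bool × PySem.Set String) (i : Int) : List Bool × PySem.Set String :=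
  if PySem.List.pyGetD st.1 i false then
    if PySem.List.pyGetD is_leaves i false then
      (st.1, PySem.Set.add st.2 (pvLeaf values i))
    else
      (PySem.List.pySetD (PySem.List.pySetD st.1 (PySem.List.pyGetD children_left i 0) true)
        (PySem.List.pyGetD children_right i 0) true, st.2)
  else st

def check_children_alt (index : Int) (is_leaves : List Bool) (children_right : List Int) (children_left : List Int) (values : List (List (List Int))) : String :=
  match PySem.List.pyGet? is_leaves index with
  | none => "not-equal"
  | some b =>
    if b then pvLeaf values index
    else
      let n := is_leaves.length
      let reach0 := PySem.List.pySetD (List.replicate n false) index true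
      let st := (PySem.List.pyRange index (n : Int) 1).foldl
        (pvSweepStep is_leaves children_right children_left values) (reach0, PySem.Set.empty)
      if st.2.length = 1 then st.2.headD "not-equal" else "not-equal"

-- ===== PRECONDITION & SPEC =====
-- Per-node well-formedness: a leaf has a value row values[i][0] of length ≥ 2 (else Python
-- raises IndexError); an inner node has both children strictly greater than i and in range.
def pvNodeOK (n : Nat) (is_leaves : List Bool) (children_right children_left : List Int) (values : List (List (List Int))) (i : Nat) : Bool :=
  if is_leaves.getD i false then
    decide (1 ≤ (values.getD i []).length ∧ 2 ≤ ((values.getD i []).headD []).length)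
  else
    decide ((i : Int) < children_right.getD i 0 ∧ children_right.getD i 0 < (n : Int) ∧ (i : Int) < children_left.getD i 0 ∧ children_left.getD i 0 < (n : Int))

-- The position a (possibly negative, Python-style) root index denotes.
def pvEff (index : Int) (n : Nat) : Nat := (if index < 0 then index + n else index).toNat

-- Pre_ excludes inputs where Python raises (root index out of range, malformed leaf rows,
-- unbounded recursion on cyclic child links) and, a stated narrowing, inputs on which A still
-- returns whose non-leaf root is negative (Python wraparound indexing) or whose node table is
-- outside the usual decision-tree shape (every node ≥ the root having in-range children
-- strictly greater than itself) — a closed-form termination condition needs that shape even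
-- though A happens to terminate on some inputs outside it.
def Pre_check_children (index : Int) (is_leaves : List Bool) (children_right : List Int) (children_left : List Int) (values : List (List (List Int))) : Prop :=
  children_right.length = is_leaves.length ∧ children_left.length = is_leaves.length ∧
  values.length = is_leaves.length ∧
  -(is_leaves.length : Int) ≤ index ∧ index < (is_leaves.length : Int) ∧
  (if is_leaves.getD (pvEff index is_leaves.length) false then
     pvNodeOK is_leaves.length is_leaves children_right children_left values (pvEff index is_leaves.length) = true
   else
     0 ≤ index ∧
     ∀ i : Nat, i < is_leaves.length → index.toNat ≤ i →
       pvNodeOK is_leaves.length is_leaves children_right children_left values i = true)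
instance (index : Int) (is_leaves : List Bool) (children_right : List Int) (children_left : List Int) (values : List (List (List Int))) : Decidable (Pre_check_children index is_leaves children_right children_left values) := by unfold Pre_check_children; infer_instance

def pvWitness_check_children : Int × List Bool × List Int × List Int × List (List (List Int)) :=
  (0, [false, true, true], [2, 0, 0], [1, 0, 0], [[], [[1, 2]], [[3, 2]]])

def Spec_check_children (index : Int) (is_leaves : List Bool) (children_right : List Int) (children_left : List Int) (values : List (List (List Int))) (out : String) : Prop := out = check_children_alt index is_leaves children_right children_left values
instance (index : Int) (is_leaves : List Bool) (children_right : List Int) (children_left : List Int) (values : List (List (List Int))) (out : String) : Decidable (Spec_check_children index is_leaves children_right children_left values out) := by unfold Spec_check_children; infer_instance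

-- ===== CLAIM (what is proved, stated in full; the proofs are below) =====
def Claim_equal_check_children : Prop := ∀ (index : Int) (is_leaves : List Bool) (children_right : List Int) (children_left : List Int) (values : List (List (List Int))), Dom_check_children index is_leaves children_right children_left values → Pre_check_children index is_leaves children_right children_left values → Spec_check_children index is_leaves children_right children_left values (check_children index is_leaves children_right children_left values)

-- ===== LEMMAS AND PROOFS =====

-- A's result combiner.
def pvMerge (a b : String) : String := if a = b ∧ a ≠ "not-equal" then a else "not-equal"

def pvEval : List String → String
  | [] => "not-equal"
  | x :: xs => xs.foldl pvMerge x

-- The list of leaf labels of the subtree at i (right subtree first, as A visits it).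
def pvLL (fuel : Nat) (i : Int) (is_leaves : List Bool) (children_right children_left : List Int) (values : List (List (List Int))) : List String :=
  match fuel with
  | 0 => []
  | f+1 =>
    match PySem.List.pyGet? is_leaves i with
    | none => []
    | some b =>
      if b then [pvLeaf values i]
      else pvLL f (PySem.List.pyGetD children_right i 0) is_leaves children_right children_left values
           ++ pvLL f (PySem.List.pyGetD children_left i 0) is_leaves children_right children_left values

def pvAddAll (s : PySem.Set String) (L : List String) : PySem.Set String := L.foldl PySem.Set.add s

def pvFin (s : List String) : String := if s.length = 1 then s.headD "not-equal" else "not-equal"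

-- The sweep invariant: before processing position i, the collected labels together with the
-- leaf labels of the subtrees of the still-unprocessed reached positions are exactly the leaf
-- labels of the root's subtree.
def pvINV (i : Nat) (isl : List Bool) (cr cl : List Int) (values : List (List (List Int))) (r : Nat) (reach : List Bool) (labels : PySem.Set String) : Prop :=
  reach.length = isl.length ∧ labels.Nodup ∧
  (∀ j : Nat, j < isl.length → reach.getD j false = true → r ≤ j) ∧
  (∀ x, (x ∈ labels ∨ ∃ j : Nat, i ≤ j ∧ j < isl.length ∧ reach.getD j false = true ∧
          x ∈ pvLL (isl.length + 1) (j : Int) isl cr cl values) ↔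
        x ∈ pvLL (isl.length + 1) (r : Int) isl cr cl values)

theorem pvMerge_self (a : String) : pvMerge a a = a := by
  by_cases h : a = "not-equal" <;> simp [pvMerge, h]

theorem pvMerge_ne_left (b : String) : pvMerge "not-equal" b = "not-equal" := by
  simp [pvMerge]

theorem pvMerge_assoc (a b c : String) : pvMerge (pvMerge a b) c = pvMerge a (pvMerge b c) := by
  unfold pvMerge; split_ifs <;> simp_all

theorem foldl_pvMerge_ne (xs : List String) : xs.foldl pvMerge "not-equal" = "not-equal" := by
  induction xs with
  | nil => rfl
  | cons z zs ih => simp [List.foldl, pvMerge_ne_left, ih]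

theorem pvEval_all_eq (x : String) (xs : List String) (h : ∀ y ∈ xs, y = x) :
    xs.foldl pvMerge x = x := by
  induction xs with
  | nil => rfl
  | cons z zs ih =>
    have hz : z = x := h z (by simp)
    simp [List.foldl, hz, pvMerge_self, ih (fun y hy => h y (by simp [hy]))]

theorem pvEval_ne (x y : String) (xs : List String) (hy : y ∈ xs) (hne : y ≠ x) :
    xs.foldl pvMerge x = "not-equal" := by
  induction xs generalizing x with
  | nil => simp at hy
  | cons z zs ih =>
    by_cases hz : z = x
    · subst hz
      have hyz : y ∈ zs := by
        rcases List.mem_cons.mp hy with h | h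
        · exact absurd h hne
        · exact h
      simp only [List.foldl, pvMerge_self]
      exact ih z hyz hne
    · have : pvMerge x z = "not-equal" := by
        unfold pvMerge
        rw [if_neg (by intro h; exact hz h.1.symm)]
      simp only [List.foldl, this, foldl_pvMerge_ne]

theorem foldl_pvMerge_cons (ys : List String) : ∀ a y : String,
    ((y :: ys).foldl pvMerge a) = pvMerge a (ys.foldl pvMerge y) := by
  induction ys with
  | nil => intro a y; rfl
  | cons z zs ih =>
    intro a y
    have h1 := ih (pvMerge a y) z
    have h2 := ih y z
    simp only [List.foldl] at h1 h2 ⊢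
    rw [h1, pvMerge_assoc, ← h2]

theorem pvEval_append (L1 L2 : List String) (h1 : L1 ≠ []) (h2 : L2 ≠ []) :
    pvEval (L1 ++ L2) = pvMerge (pvEval L1) (pvEval L2) := by
  obtain ⟨x, xs, rfl⟩ := List.exists_cons_of_ne_nil h1
  obtain ⟨y, ys, rfl⟩ := List.exists_cons_of_ne_nil h2
  show (xs ++ y :: ys).foldl pvMerge x = _
  rw [List.foldl_append, foldl_pvMerge_cons]
  rfl

theorem mem_pvAddAll (L : List String) : ∀ (s : PySem.Set String) (x : String),
    x ∈ pvAddAll s L ↔ x ∈ s ∨ x ∈ L := by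
  induction L with
  | nil => intro s x; simp [pvAddAll]
  | cons a L ih =>
    intro s x
    show x ∈ pvAddAll (PySem.Set.add s a) L ↔ _
    rw [ih]
    simp [PySem.Set.mem_add]
    tauto

theorem nodup_pvAddAll (L : List String) : ∀ s : PySem.Set String, s.Nodup → (pvAddAll s L).Nodup := by
  induction L with
  | nil => intro s hs; exact hs
  | cons a L ih => intro s hs; exact ih _ (PySem.Set.nodup_add _ _ hs)

theorem pvFin_congr (s t : List String) (hs : s.Nodup) (ht : t.Nodup)
    (h : ∀ x, x ∈ s ↔ x ∈ t) : pvFin s = pvFin t := by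
  have hp : s.Perm t := (List.perm_ext_iff_of_nodup hs ht).mpr h
  have hl : s.length = t.length := hp.length_eq
  by_cases h1 : t.length = 1
  · obtain ⟨b, rfl⟩ := List.length_eq_one_iff.mp h1
    obtain ⟨a, rfl⟩ := List.length_eq_one_iff.mp (hl.trans h1)
    have : a = b := by have := (h a).mp (by simp); simpa using this
    rw [this]
  · simp [pvFin, hl, h1]

theorem pvFin_not_one (s : List String) (x y : String) (hx : x ∈ s) (hy : y ∈ s) (hne : y ≠ x) :
    pvFin s = "not-equal" := by
  have : s.length ≠ 1 := by
    intro h1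
    obtain ⟨a, rfl⟩ := List.length_eq_one_iff.mp h1
    simp at hx hy
    exact hne (hy.trans hx.symm)
  simp [pvFin, this]

theorem pvAddAll_all_eq (x : String) (xs : List String) (h : ∀ y ∈ xs, y = x) :
    pvAddAll [x] xs = [x] := by
  induction xs with
  | nil => rfl
  | cons z zs ih =>
    have hz : z = x := h z (by simp)
    show pvAddAll (PySem.Set.add [x] z) zs = [x]
    rw [hz, PySem.Set.add_of_mem (by simp)]
    exact ih (fun y hy => h y (by simp [hy]))

theorem pvBridge (L : List String) (hL : L ≠ []) : pvEval L = pvFin (pvAddAll [] L) := by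
  obtain ⟨x, xs, rfl⟩ := List.exists_cons_of_ne_nil hL
  have hhead : pvAddAll [] (x :: xs) = pvAddAll [x] xs := by
    show pvAddAll (PySem.Set.add [] x) xs = _
    rw [PySem.Set.add_of_not_mem (by simp)]
    rfl
  by_cases hall : ∀ y ∈ xs, y = x
  · rw [hhead, pvAddAll_all_eq x xs hall]
    show xs.foldl pvMerge x = pvFin [x]
    rw [pvEval_all_eq x xs hall]
    simp [pvFin]
  · push_neg at hall
    obtain ⟨y, hy, hne⟩ := hall
    have hxmem : x ∈ pvAddAll [] (x :: xs) := by rw [mem_pvAddAll]; simp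
    have hymem : y ∈ pvAddAll [] (x :: xs) := by rw [mem_pvAddAll]; simp [hy]
    show xs.foldl pvMerge x = _
    rw [pvEval_ne x y xs hy hne, pvFin_not_one _ x y hxmem hymem hne]

-- step (unfold) lemmas for the fueled definitions
theorem pvCheckA_succ (f : Nat) (i : Int) (isl : List Bool) (cr cl : List Int) (values : List (List (List Int))) :
    pvCheckA (f+1) i isl cr cl values =
      match PySem.List.pyGet? isl i with
      | none => "not-equal"
      | some b =>
        if b then pvLeaf values i
        else
          let rr := pvCheckA f (PySem.List.pyGetD cr i 0) isl cr cl values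
          let ll := pvCheckA f (PySem.List.pyGetD cl i 0) isl cr cl values
          if rr = ll ∧ rr ≠ "not-equal" then rr else "not-equal" := rfl

theorem pvLL_succ (f : Nat) (i : Int) (isl : List Bool) (cr cl : List Int) (values : List (List (List Int))) :
    pvLL (f+1) i isl cr cl values =
      match PySem.List.pyGet? isl i with
      | none => []
      | some b =>
        if b then [pvLeaf values i]
        else pvLL f (PySem.List.pyGetD cr i 0) isl cr cl values
             ++ pvLL f (PySem.List.pyGetD cl i 0) isl cr cl values := rfl

-- getD after a point update
theorem pv_getD_set (xs : List Bool) (k j : Nat) (b : Bool) :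
    (xs.set k b).getD j false = if j = k ∧ k < xs.length then b else xs.getD j false := by
  by_cases hk : j = k ∧ k < xs.length
  · obtain ⟨rfl, hlt⟩ := hk
    rw [if_pos ⟨rfl, hlt⟩, List.getD_eq_getElem _ _ (by simpa using hlt)]
    simp [List.getElem_set, hlt]
  · rw [if_neg hk]
    by_cases hj : j < xs.length
    · rw [List.getD_eq_getElem _ _ (by simpa using hj), List.getD_eq_getElem _ _ hj]
      rcases Decidable.em (j = k) with rfl | hne
      · exfalso; exact hk ⟨rfl, hj⟩
      · simp [List.getElem_set, Ne.symm hne]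
    · rw [List.getD_eq_default _ _ (by simpa using not_lt.mp hj),
          List.getD_eq_default _ _ (not_lt.mp hj)]

-- facts extracted from pvNodeOK at a non-leaf node
theorem pvNode_children (isl : List Bool) (cr cl : List Int) (values : List (List (List Int)))
    (t : Nat) (ht : t < isl.length) (hb : isl[t] = false)
    (hok : pvNodeOK isl.length isl cr cl values t = true) :
    (t : Int) < cr.getD t 0 ∧ cr.getD t 0 < (isl.length : Int) ∧
    (t : Int) < cl.getD t 0 ∧ cl.getD t 0 < (isl.length : Int) := by
  unfold pvNodeOK at hok
  rw [List.getD_eq_getElem isl false ht, hb] at hok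
  simpa using hok

theorem pvCheckA_eval (isl : List Bool) (cr cl : List Int) (values : List (List (List Int))) (lo : Nat)
    (hcr : cr.length = isl.length) (hcl : cl.length = isl.length)
    (H : ∀ j : Nat, j < isl.length → lo ≤ j → pvNodeOK isl.length isl cr cl values j = true) :
    ∀ (fuel : Nat) (i : Int), 0 ≤ i → i < (isl.length : Int) → lo ≤ i.toNat →
      isl.length - i.toNat ≤ fuel →
      pvCheckA fuel i isl cr cl values = pvEval (pvLL fuel i isl cr cl values) ∧
      pvLL fuel i isl cr cl values ≠ [] := by
  intro fuel
  induction fuel with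
  | zero => intro i h0 hin hlo hf; exfalso; omega
  | succ f ih =>
    intro i h0 hin hlo hf
    have htn : i.toNat < isl.length := by omega
    have hti : (i.toNat : Int) = i := Int.toNat_of_nonneg h0
    have hget : PySem.List.pyGet? isl i = some isl[i.toNat] :=
      PySem.List.pyGet?_eq_some_getElem isl h0 (by exact_mod_cast hin)
    rw [pvCheckA_succ, pvLL_succ, hget]
    by_cases hb : isl[i.toNat] = true
    · simp [hb, pvEval]
    · have hbf : isl[i.toNat] = false := by simpa using hb
      obtain ⟨hr1, hr2, hl1, hl2⟩ :=
        pvNode_children isl cr cl values i.toNat htn hbf (H i.toNat htn hlo)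
      have hcrD : PySem.List.pyGetD cr i 0 = cr.getD i.toNat 0 := by
        rw [PySem.List.pyGetD_eq_getElem cr 0 h0 (by rw [hcr]; exact_mod_cast hin),
            List.getD_eq_getElem cr 0 (by omega)]
      have hclD : PySem.List.pyGetD cl i 0 = cl.getD i.toNat 0 := by
        rw [PySem.List.pyGetD_eq_getElem cl 0 h0 (by rw [hcl]; exact_mod_cast hin),
            List.getD_eq_getElem cl 0 (by omega)]
      rw [hti] at hr1 hl1
      have hrr := ih (PySem.List.pyGetD cr i 0)
        (by rw [hcrD]; omega) (by rw [hcrD]; exact hr2)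
        (by rw [hcrD]; omega) (by rw [hcrD]; omega)
      have hll := ih (PySem.List.pyGetD cl i 0)
        (by rw [hclD]; omega) (by rw [hclD]; exact hl2)
        (by rw [hclD]; omega) (by rw [hclD]; omega)
      refine ⟨?_, ?_⟩
      · simp only [hbf, Bool.false_eq_true, reduceIte]
        rw [pvEval_append _ _ hrr.2 hll.2, ← hrr.1, ← hll.1]
        rfl
      · simp only [hbf, Bool.false_eq_true, reduceIte]
        intro hcon
        exact hrr.2 (List.append_eq_nil_iff.mp hcon).1

theorem pvLL_fuel (isl : List Bool) (cr cl : List Int) (values : List (List (List Int))) (lo : Nat)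
    (hcr : cr.length = isl.length) (hcl : cl.length = isl.length)
    (H : ∀ j : Nat, j < isl.length → lo ≤ j → pvNodeOK isl.length isl cr cl values j = true) :
    ∀ (f1 f2 : Nat) (i : Int), 0 ≤ i → i < (isl.length : Int) → lo ≤ i.toNat →
      isl.length - i.toNat ≤ f1 → isl.length - i.toNat ≤ f2 →
      pvLL f1 i isl cr cl values = pvLL f2 i isl cr cl values := by
  intro f1
  induction f1 with
  | zero => intro f2 i h0 hin hlo hf1 hf2; exfalso; omega
  | succ g ih =>
    intro f2 i h0 hin hlo hf1 hf2
    obtain ⟨h, rfl⟩ : ∃ h, f2 = h + 1 := by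
      cases f2 with
      | zero => exfalso; omega
      | succ h => exact ⟨h, rfl⟩
    have htn : i.toNat < isl.length := by omega
    have hti : (i.toNat : Int) = i := Int.toNat_of_nonneg h0
    have hget : PySem.List.pyGet? isl i = some isl[i.toNat] :=
      PySem.List.pyGet?_eq_some_getElem isl h0 (by exact_mod_cast hin)
    rw [pvLL_succ, pvLL_succ, hget]
    by_cases hb : isl[i.toNat] = true
    · simp [hb]
    · have hbf : isl[i.toNat] = false := by simpa using hb
      obtain ⟨hr1, hr2, hl1, hl2⟩ :=
        pvNode_children isl cr cl values i.toNat htn hbf (H i.toNat htn hlo)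
      have hcrD : PySem.List.pyGetD cr i 0 = cr.getD i.toNat 0 := by
        rw [PySem.List.pyGetD_eq_getElem cr 0 h0 (by rw [hcr]; exact_mod_cast hin),
            List.getD_eq_getElem cr 0 (by omega)]
      have hclD : PySem.List.pyGetD cl i 0 = cl.getD i.toNat 0 := by
        rw [PySem.List.pyGetD_eq_getElem cl 0 h0 (by rw [hcl]; exact_mod_cast hin),
            List.getD_eq_getElem cl 0 (by omega)]
      rw [hti] at hr1 hl1
      simp only [hbf, Bool.false_eq_true, reduceIte]
      rw [ih h (PySem.List.pyGetD cr i 0) (by rw [hcrD]; omega) (by rw [hcrD]; exact hr2)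
            (by rw [hcrD]; omega) (by rw [hcrD]; omega) (by rw [hcrD]; omega),
          ih h (PySem.List.pyGetD cl i 0) (by rw [hclD]; omega) (by rw [hclD]; exact hl2)
            (by rw [hclD]; omega) (by rw [hclD]; omega) (by rw [hclD]; omega)]

-- the sweep preserves the invariant up to the end of the range
theorem pvSweep_inv (isl : List Bool) (cr cl : List Int) (values : List (List (List Int))) (r : Nat)
    (hcr : cr.length = isl.length) (hcl : cl.length = isl.length)
    (H : ∀ j : Nat, j < isl.length → r ≤ j → pvNodeOK isl.length isl cr cl values j = true) :
    ∀ (k i : Nat), isl.length - i = k → r ≤ i →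
      ∀ (reach : List Bool) (labels : PySem.Set String),
        pvINV i isl cr cl values r reach labels →
        pvINV isl.length isl cr cl values r
          (((PySem.List.pyRange (i : Int) (isl.length : Int) 1).foldl
            (pvSweepStep isl cr cl values) (reach, labels)).1)
          (((PySem.List.pyRange (i : Int) (isl.length : Int) 1).foldl
            (pvSweepStep isl cr cl values) (reach, labels)).2) := by
  intro k
  induction k with
  | zero =>
    intro i hk hr reach labels hinv
    rw [PySem.List.pyRange_one_eq_nil (by exact_mod_cast Nat.le_of_sub_eq_zero hk)]
    obtain ⟨h1, h2, h3, h4⟩ := hinv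
    refine ⟨h1, h2, h3, fun x => ?_⟩
    rw [← h4 x]
    constructor
    · rintro (hx | ⟨j, hj1, hj2, _⟩)
      · exact Or.inl hx
      · exfalso; omega
    · rintro (hx | ⟨j, hj1, hj2, _⟩)
      · exact Or.inl hx
      · exfalso; omega
  | succ k ih =>
    intro i hk hr reach labels hinv
    obtain ⟨h1, h2, h3, h4⟩ := hinv
    have hin : i < isl.length := by omega
    rw [PySem.List.pyRange_one_cons (by exact_mod_cast hin), List.foldl_cons]
    have hreachD : PySem.List.pyGetD reach (i : Int) false = reach.getD i false := by
      simp [PySem.List.pyGetD_natCast]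
    have hislD : PySem.List.pyGetD isl (i : Int) false = isl.getD i false := by
      simp [PySem.List.pyGetD_natCast]
    by_cases hri : reach.getD i false = true
    · by_cases hli : isl.getD i false = true
      · -- reached leaf: add its label
        have hstep : pvSweepStep isl cr cl values (reach, labels) (i : Int)
            = (reach, PySem.Set.add labels (pvLeaf values (i : Int))) := by
          unfold pvSweepStep
          rw [hreachD, hislD, hri, hli]
          simp
        rw [hstep]
        refine ih (i+1) (by omega) (by omega) _ _ ⟨h1, PySem.Set.nodup_add _ _ h2, h3, fun x => ?_⟩
        have hget : PySem.List.pyGet? isl (i : Int) = some isl[i] := by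
          have := PySem.List.pyGet?_eq_some_getElem isl (i := (i : Int)) (by positivity)
            (by exact_mod_cast hin)
          simpa using this
        have hLLi : pvLL (isl.length + 1) (i : Int) isl cr cl values = [pvLeaf values (i : Int)] := by
          rw [pvLL_succ, hget]
          have : isl[i] = true := by
            rw [List.getD_eq_getElem isl false hin] at hli; exact hli
          simp [this]
        rw [← h4 x]
        rw [PySem.Set.mem_add]
        constructor
        · rintro ((hx | hx) | ⟨j, hj1, hj2, hj3, hj4⟩)
          · exact Or.inl hx
          · exact Or.inr ⟨i, le_refl _, hin, hri, by rw [hLLi]; simp [hx]⟩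
          · exact Or.inr ⟨j, by omega, hj2, hj3, hj4⟩
        · rintro (hx | ⟨j, hj1, hj2, hj3, hj4⟩)
          · exact Or.inl (Or.inl hx)
          · rcases Nat.lt_or_ge j (i+1) with hj | hj
            · have : j = i := by omega
              subst this
              rw [hLLi] at hj4
              exact Or.inl (Or.inr (by simpa using hj4))
            · exact Or.inr ⟨j, hj, hj2, hj3, hj4⟩
      · -- reached inner node: mark both children
        have hbf : isl[i] = false := by
          rw [List.getD_eq_getElem isl false hin] at hli; simpa using hli
        obtain ⟨hr1, hr2, hl1, hl2⟩ :=
          pvNode_children isl cr cl values i hin hbf (H i hin hr)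
        have hcrD : PySem.List.pyGetD cr (i : Int) 0 = cr.getD i 0 := by
          simp [PySem.List.pyGetD_natCast]
        have hclD : PySem.List.pyGetD cl (i : Int) 0 = cl.getD i 0 := by
          simp [PySem.List.pyGetD_natCast]
        have hstep : pvSweepStep isl cr cl values (reach, labels) (i : Int)
            = (((reach.set (cl.getD i 0).toNat true).set (cr.getD i 0).toNat true), labels) := by
          unfold pvSweepStep
          rw [hreachD, hislD, hri]
          rw [Bool.not_eq_true] at hli
          rw [hli]
          simp only [Bool.false_eq_true, reduceIte]
          rw [hcrD, hclD,
            PySem.List.pySetD_of_nonneg _ _ (by omega),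
            PySem.List.pySetD_of_nonneg _ _ (by omega)]
        set clN := (cl.getD i 0).toNat with hclN
        set crN := (cr.getD i 0).toNat with hcrN
        have hclb : i < clN ∧ clN < isl.length := by constructor <;> omega
        have hcrb : i < crN ∧ crN < isl.length := by constructor <;> omega
        set reach' := (reach.set clN true).set crN true with hreach'
        have hlen' : reach'.length = isl.length := by simp [hreach', h1]
        have hgetD' : ∀ j : Nat, j < isl.length →
            (reach'.getD j false = true ↔ reach.getD j false = true ∨ j = crN ∨ j = clN) := by
          intro j hj
          rw [hreach', pv_getD_set, pv_getD_set]
          by_cases hjc : j = crN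
          · simp [hjc, h1, List.length_set]; omega
          · rw [if_neg (by tauto)]
            by_cases hjl : j = clN
            · simp [hjl, h1]; omega
            · rw [if_neg (by tauto)]; tauto
        rw [hstep]
        refine ih (i+1) (by omega) (by omega) _ _ ⟨hlen', h2, ?_, fun x => ?_⟩
        · intro j hj hj2
          rcases (hgetD' j hj).mp hj2 with h | h | h
          · exact h3 j hj h
          · omega
          · omega
        · have hget : PySem.List.pyGet? isl (i : Int) = some isl[i] := by
            have := PySem.List.pyGet?_eq_some_getElem isl (i := (i : Int)) (by positivity)
              (by exact_mod_cast hin)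
            simpa using this
          have hLLi : pvLL (isl.length + 1) (i : Int) isl cr cl values
              = pvLL isl.length (cr.getD i 0) isl cr cl values
                ++ pvLL isl.length (cl.getD i 0) isl cr cl values := by
            rw [pvLL_succ, hget, hcrD, hclD]
            simp [hbf]
          have hfr : pvLL isl.length (cr.getD i 0) isl cr cl values
              = pvLL (isl.length + 1) ((crN : Nat) : Int) isl cr cl values := by
            have he : ((crN : Nat) : Int) = cr.getD i 0 := by omega
            rw [he]
            exact pvLL_fuel isl cr cl values r hcr hcl H _ _ _ (by omega) hr2 (by omega)
              (by omega) (by omega)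
          have hfl : pvLL isl.length (cl.getD i 0) isl cr cl values
              = pvLL (isl.length + 1) ((clN : Nat) : Int) isl cr cl values := by
            have he : ((clN : Nat) : Int) = cl.getD i 0 := by omega
            rw [he]
            exact pvLL_fuel isl cr cl values r hcr hcl H _ _ _ (by omega) hl2 (by omega)
              (by omega) (by omega)
          rw [← h4 x]
          constructor
          · rintro (hx | ⟨j, hj1, hj2, hj3, hj4⟩)
            · exact Or.inl hx
            · rcases (hgetD' j hj2).mp hj3 with h | rfl | rfl
              · exact Or.inr ⟨j, by omega, hj2, h, hj4⟩
              · -- j = crN: its subtree is inside i's subtree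
                refine Or.inr ⟨i, le_refl _, hin, hri, ?_⟩
                rw [hLLi, hfr]
                exact List.mem_append.mpr (Or.inl hj4)
              · refine Or.inr ⟨i, le_refl _, hin, hri, ?_⟩
                rw [hLLi, hfl]
                exact List.mem_append.mpr (Or.inr hj4)
          · rintro (hx | ⟨j, hj1, hj2, hj3, hj4⟩)
            · exact Or.inl hx
            · rcases Nat.lt_or_ge j (i+1) with hj | hj
              · have : j = i := by omega
                subst this
                rw [hLLi] at hj4
                rcases List.mem_append.mp hj4 with hm | hm
                · exact Or.inr ⟨crN, by omega, hcrb.2,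
                    (hgetD' crN hcrb.2).mpr (Or.inr (Or.inl rfl)), by rw [← hfr]; exact hm⟩
                · exact Or.inr ⟨clN, by omega, hclb.2,
                    (hgetD' clN hclb.2).mpr (Or.inr (Or.inr rfl)), by rw [← hfl]; exact hm⟩
              · exact Or.inr ⟨j, hj, hj2, (hgetD' j hj2).mpr (Or.inl hj3), hj4⟩
    · -- unreached position: state unchanged
      have hstep : pvSweepStep isl cr cl values (reach, labels) (i : Int) = (reach, labels) := by
        unfold pvSweepStep
        rw [hreachD]
        rw [Bool.not_eq_true] at hri
        rw [hri]
        simp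
      rw [hstep]
      refine ih (i+1) (by omega) (by omega) _ _ ⟨h1, h2, h3, fun x => ?_⟩
      rw [← h4 x]
      constructor
      · rintro (hx | ⟨j, hj1, hj2, hj3, hj4⟩)
        · exact Or.inl hx
        · exact Or.inr ⟨j, by omega, hj2, hj3, hj4⟩
      · rintro (hx | ⟨j, hj1, hj2, hj3, hj4⟩)
        · exact Or.inl hx
        · rcases Nat.lt_or_ge j (i+1) with hj | hj
          · have : j = i := by omega
            subst this
            rw [Bool.not_eq_true] at hri
            rw [hri] at hj3
            exact absurd hj3 (by simp)
          · exact Or.inr ⟨j, hj, hj2, hj3, hj4⟩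

-- ===== VERDICT (by name: the statement is the Claim_ definition above) =====
theorem check_children_spec : Claim_equal_check_children := by
  unfold Claim_equal_check_children
  intro index isl cr cl values _hdom hpre
  unfold Spec_check_children check_children check_children_alt
  obtain ⟨hcr, hcl, _hv, hlb, hin, hbr⟩ := hpre
  have heffn : pvEff index isl.length < isl.length := by unfold pvEff; split <;> omega
  have hget : PySem.List.pyGet? isl index = some (isl.getD (pvEff index isl.length) false) := by
    by_cases h0 : 0 ≤ index
    · have hidx : pvEff index isl.length = index.toNat := by
        unfold pvEff; rw [if_neg (by omega)]
      rw [hidx, PySem.List.pyGet?_eq_some_getElem isl h0 (by exact_mod_cast hin),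
        List.getD_eq_getElem isl false (by omega)]
    · have hidx : pvEff index isl.length = isl.length - (-index).toNat := by
        unfold pvEff; rw [if_pos (by omega)]; omega
      have hk : index = -(((-index).toNat : Nat) : Int) := by omega
      rw [hidx, hk, PySem.List.pyGet?_neg_natCast isl (-index).toNat (by omega) (by omega),
        List.getElem?_eq_getElem (by omega), List.getD_eq_getElem isl false (by omega)]
      simp only [neg_neg, Int.toNat_natCast]
  by_cases hb : isl.getD (pvEff index isl.length) false = true
  · -- leaf root: both sides return the leaf label directly
    have hget' : PySem.List.pyGet? isl index = some true := by rw [hget, hb]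
    rw [pvCheckA_succ, hget']
    simp
  · -- inner root: A evaluates the leaf-label list, B sweeps the table collecting the same set
    have hget' : PySem.List.pyGet? isl index = some false := by
      rw [hget]
      simp only [Bool.not_eq_true] at hb
      rw [hb]
    rw [if_neg hb] at hbr
    obtain ⟨h0, hbr⟩ := hbr
    set r := index.toNat with hrdef
    have hidx : index = (r : Int) := by omega
    have htn : r < isl.length := by omega
    have hA := pvCheckA_eval isl cr cl values r hcr hcl hbr
      (isl.length + 1) index h0 hin (le_refl _) (by omega)
    -- initial state of the sweep
    have hinv0 : pvINV r isl cr cl values r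
        (PySem.List.pySetD (List.replicate isl.length false) index true) PySem.Set.empty := by
      have hr0 : PySem.List.pySetD (List.replicate isl.length false) index true
          = (List.replicate isl.length false).set r true := by
        rw [PySem.List.pySetD_of_nonneg _ _ h0]
      rw [hr0]
      have hgd : ∀ j : Nat, j < isl.length →
          (((List.replicate isl.length false).set r true).getD j false = true ↔ j = r) := by
        intro j hj
        rw [pv_getD_set]
        by_cases hjr : j = r
        · simp [hjr, htn]
        · rw [if_neg (by simp [hjr])]
          simp [List.getD_eq_getElem _ false (by simpa using hj), hjr]
      refine ⟨by simp, by simp [PySem.Set.empty], ?_, fun x => ?_⟩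
      · intro j hj hj2
        rw [hgd j hj] at hj2
        omega
      · constructor
        · rintro (hx | ⟨j, _, hj2, hj3, hj4⟩)
          · exact absurd hx (by simp [PySem.Set.empty])
          · rwa [(hgd j hj2).mp hj3] at hj4
        · intro hx
          exact Or.inr ⟨r, le_refl _, htn, (hgd r htn).mpr rfl, hx⟩
    have hfin := pvSweep_inv isl cr cl values r hcr hcl hbr (isl.length - r) r rfl (le_refl _)
      _ _ hinv0
    obtain ⟨_, hnd, _, hmem⟩ := hfin
    have hmem' : ∀ x,
        x ∈ ((PySem.List.pyRange (r : Int) (isl.length : Int) 1).foldl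
          (pvSweepStep isl cr cl values)
          (PySem.List.pySetD (List.replicate isl.length false) index true, PySem.Set.empty)).2 ↔
        x ∈ pvLL (isl.length + 1) (r : Int) isl cr cl values := by
      intro x
      rw [← hmem x]
      constructor
      · exact fun h => Or.inl h
      · rintro (h | ⟨j, hj1, hj2, _⟩)
        · exact h
        · exfalso; omega
    have hA1 := hA.1
    rw [pvCheckA_succ, hget'] at hA1
    simp only [Bool.false_eq_true, reduceIte] at hA1
    rw [pvCheckA_succ, hget']
    simp only [Bool.false_eq_true, reduceIte]
    rw [hA1]
    rw [pvBridge _ hA.2]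
    rw [hidx] at hnd hmem' ⊢
    show pvFin _ = pvFin _
    apply pvFin_congr _ _ (nodup_pvAddAll _ _ (by simp)) hnd
    intro x
    rw [mem_pvAddAll, hmem' x]
    simp
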